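-- pv_equiv track=rewrite | github.com/ankushtanwar-amroar/Amroar_CRM_replace | backend/modules/flow_builder/runtime/flow_runtime.py | _is_inside_quotes
-- ===== SOURCE A (Python) =====
-- def _is_inside_quotes(text: str, substring: str) -> bool:
--     """Check if a substring appears inside quotes in text"""
--     in_quotes = False
--     quote_char = None
--     i = 0
--
--     while i < len(text):
--         char = text[i]
--
--         if char in ['"', "'"]:
--             if not in_quotes:
--                 in_quotes = True
--                 quote_char = char
--             elif char == quote_char:
--                 in_quotes = False
--                 quote_char = None
--
--         # Check if we're at the start of the substring
--         if text[i:i+len(substring)] == substring and in_quotes: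
--             return True
--
--         i += 1
--
--     return False
-- ===== SOURCE B (Python) =====
-- def _is_inside_quotes(text: str, substring: str) -> bool:
--     """Check if a substring appears inside quotes in text"""
--     # Pass 1: in-quotes state after processing each character.
--     states = []
--     in_quotes = False
--     quote_char = None
--     for ch in text:
--         if ch == '"' or ch == "'":
--             if not in_quotes:
--                 in_quotes = True
--                 quote_char = ch
--             elif ch == quote_char:
--                 in_quotes = False
--                 quote_char = None
--         states.append(in_quotes)
--     # Pass 2: jump between occurrences with str.find.
--     pos = text.find(substring)
--     while pos != -1:
--         if pos < len(text) and states[pos]: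
--             return True
--         pos = text.find(substring, pos + 1)
--     return False
-- ===== Notes on version B (the rewrite author's own statement) =====
-- stated objective: faster
-- what changed: A interleaves quote-state tracking with an O(m) slice comparison at every character; B splits the task into two passes: one pass precomputing the in-quotes state per position, then a str.find-driven loop that jumps directly between substring occurrences and checks the precomputed state there.
import Mathlib
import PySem

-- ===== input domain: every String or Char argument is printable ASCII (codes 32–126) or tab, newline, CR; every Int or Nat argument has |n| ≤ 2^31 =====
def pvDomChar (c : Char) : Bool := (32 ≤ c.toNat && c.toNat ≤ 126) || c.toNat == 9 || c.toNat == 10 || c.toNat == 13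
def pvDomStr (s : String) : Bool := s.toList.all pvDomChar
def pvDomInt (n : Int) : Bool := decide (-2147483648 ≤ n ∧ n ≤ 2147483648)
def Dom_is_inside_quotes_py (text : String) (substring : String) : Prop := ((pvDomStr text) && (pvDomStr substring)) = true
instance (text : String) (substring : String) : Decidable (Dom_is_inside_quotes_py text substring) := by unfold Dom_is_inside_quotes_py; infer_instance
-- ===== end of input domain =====

-- B separates the work into two passes: first the in-quotes state after each character,
-- then a str.find-style jump between substring occurrences (objective: alternative/constant-factor faster scan).

-- ===== PORT A =====
-- shared by both ports: the quote-state update both Pythons perform per character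
def pvStep (c : Char) (inq : Bool) (qc : Option Char) : Bool × Option Char :=
  if c = '"' ∨ c = '\'' then
    if !inq then (true, some c)
    else if some c = qc then (false, none)
    else (inq, qc)
  else (inq, qc)

-- A's while loop: recursion on the remaining suffix; text[i:i+len(sub)] == sub is take-equality on the suffix
def pvLoopA (sub : List Char) : List Char → Bool → Option Char → Bool
  | [], _, _ => false
  | c :: rest, inq, qc =>
    let s := pvStep c inq qc
    if List.take sub.length (c :: rest) = sub ∧ s.1 = true then true
    else pvLoopA sub rest s.1 s.2

def is_inside_quotes_py (text : String) (substring : String) : Bool :=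
  pvLoopA substring.toList text.toList false none

-- ===== PORT B =====
-- pass 1 of Source B: list of in-quotes states, one per character
def pvStates : List Char → Bool → Option Char → List Bool
  | [], _, _ => []
  | c :: rest, inq, qc =>
    let s := pvStep c inq qc
    s.1 :: pvStates rest s.1 s.2

-- port of Python's text.find(sub, start): first j ≥ start where sub occurs (none = -1)
def pvFindFrom (sub text : List Char) (start : Nat) : Option Nat :=
  if start ≤ text.length then
    if List.take sub.length (text.drop start) = sub then some start
    else pvFindFrom sub text (start + 1)
  else none
termination_by text.length + 1 - start

theorem pvFindFrom_bounds {sub text : List Char} {start pos : Nat}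
    (h : pvFindFrom sub text start = some pos) : start ≤ pos ∧ pos ≤ text.length := by
  fun_induction pvFindFrom sub text start with
  | case1 st hle hm => simp at h; omega
  | case2 st hle hm ih => have := ih h; omega
  | case3 st hle => simp at h

-- pass 2 of Source B: the while loop hopping between find results
def pvLoopB (sub text : List Char) (states : List Bool) (start : Nat) : Bool :=
  match h : pvFindFrom sub text start with
  | none => false
  | some pos =>
    if pos < text.length ∧ states.getD pos false = true then true
    else pvLoopB sub text states (pos + 1)
termination_by text.length + 1 - start
decreasing_by
  have := pvFindFrom_bounds h
  omega

def is_inside_quotes_py_alt (text : String) (substring : String) : Bool :=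
  pvLoopB substring.toList text.toList (pvStates text.toList false none) 0

-- ===== PRECONDITION & SPEC =====
def Spec_is_inside_quotes_py (text : String) (substring : String) (out : Bool) : Prop := out = is_inside_quotes_py_alt text substring
instance (text : String) (substring : String) (out : Bool) : Decidable (Spec_is_inside_quotes_py text substring out) := by unfold Spec_is_inside_quotes_py; infer_instance

-- ===== CLAIM (what is proved, stated in full; the proofs are below) =====
def Claim_equal_is_inside_quotes_py : Prop := ∀ (text : String) (substring : String), Dom_is_inside_quotes_py text substring → Spec_is_inside_quotes_py text substring (is_inside_quotes_py text substring)

-- ===== LEMMAS AND PROOFS =====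

-- A's loop returns true iff some position in the suffix both matches the substring and is in quotes
theorem pvLoopA_iff (sub : List Char) :
    ∀ (rem : List Char) (inq : Bool) (qc : Option Char),
    pvLoopA sub rem inq qc = true ↔
      ∃ j, j < rem.length ∧ List.take sub.length (rem.drop j) = sub ∧
        (pvStates rem inq qc).getD j false = true := by
  intro rem
  induction rem with
  | nil => intro inq qc; simp [pvLoopA]
  | cons c rest ih =>
    intro inq qc
    simp only [pvLoopA, pvStates]
    by_cases hc : List.take sub.length (c :: rest) = sub ∧ (pvStep c inq qc).1 = true
    · simp only [if_pos hc]
      constructor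
      · intro _; exact ⟨0, by simp, by simpa using hc.1, by simpa using hc.2⟩
      · intro _; simp
    · simp only [if_neg hc]
      rw [ih]
      constructor
      · rintro ⟨j, hj, hm, hs⟩
        exact ⟨j + 1, by simpa using hj, by simpa using hm, by simpa using hs⟩
      · rintro ⟨j, hj, hm, hs⟩
        cases j with
        | zero => exact absurd ⟨by simpa using hm, by simpa using hs⟩ hc
        | succ k =>
          exact ⟨k, by simpa using hj, by simpa using hm, by simpa using hs⟩

-- pvFindFrom finds the first match at or after start
theorem pvFindFrom_none {sub text : List Char} {start : Nat}
    (h : pvFindFrom sub text start = none) :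
    ∀ j, start ≤ j → j ≤ text.length → List.take sub.length (text.drop j) ≠ sub := by
  fun_induction pvFindFrom sub text start with
  | case1 st hle hm => simp at h
  | case2 st hle hm ih =>
    intro j hj1 hj2
    rcases Nat.eq_or_lt_of_le hj1 with rfl | hlt
    · exact hm
    · exact ih h j hlt hj2
  | case3 st hle =>
    intro j hj1 hj2 _; omega

theorem pvFindFrom_some {sub text : List Char} {start pos : Nat}
    (h : pvFindFrom sub text start = some pos) :
    List.take sub.length (text.drop pos) = sub ∧
    ∀ j, start ≤ j → j < pos → List.take sub.length (text.drop j) ≠ sub := by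
  fun_induction pvFindFrom sub text start with
  | case1 st hle hm =>
    simp at h; subst h
    exact ⟨hm, fun j h1 h2 _ => by omega⟩
  | case2 st hle hm ih =>
    have hb := pvFindFrom_bounds h
    obtain ⟨h1, h2⟩ := ih h
    refine ⟨h1, fun j hj1 hj2 => ?_⟩
    rcases Nat.eq_or_lt_of_le hj1 with rfl | hlt
    · exact hm
    · exact h2 j hlt hj2
  | case3 st hle => simp at h

-- B's find loop returns true iff some match position at or after start is in quotes
theorem pvLoopB_iff (sub text : List Char) (states : List Bool) :
    ∀ (start : Nat),
    pvLoopB sub text states start = true ↔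
      ∃ j, start ≤ j ∧ j < text.length ∧ List.take sub.length (text.drop j) = sub ∧
        states.getD j false = true := by
  intro start
  fun_induction pvLoopB sub text states start with
  | case1 st h =>
    simp only [Bool.false_eq_true, false_iff]
    rintro ⟨j, hj1, hj2, hm, _⟩
    exact pvFindFrom_none h j hj1 (Nat.le_of_lt hj2) hm
  | case2 st pos h hcond =>
    have hb := pvFindFrom_bounds h
    have hs := pvFindFrom_some h
    simp only [true_iff]
    exact ⟨pos, hb.1, hcond.1, hs.1, hcond.2⟩
  | case3 st pos h hcond ih =>
    have hb := pvFindFrom_bounds h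
    have hs := pvFindFrom_some h
    rw [ih]
    constructor
    · rintro ⟨j, hj1, hj2, hm, hg⟩
      exact ⟨j, by omega, hj2, hm, hg⟩
    · rintro ⟨j, hj1, hj2, hm, hg⟩
      refine ⟨j, ?_, hj2, hm, hg⟩
      by_contra hlt
      rcases Nat.lt_or_ge j pos with hjp | hjp
      · exact hs.2 j hj1 hjp hm
      · have : j = pos := by omega
        subst this
        exact hcond ⟨hj2, hg⟩

-- ===== VERDICT (by name: the statement is the Claim_ definition above) =====
theorem is_inside_quotes_py_spec : Claim_equal_is_inside_quotes_py := by
  unfold Claim_equal_is_inside_quotes_py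
  intro text substring _
  unfold Spec_is_inside_quotes_py is_inside_quotes_py is_inside_quotes_py_alt
  have hA := pvLoopA_iff substring.toList text.toList false none
  have hB := pvLoopB_iff substring.toList text.toList (pvStates text.toList false none) 0
  apply Bool.eq_iff_iff.mpr
  rw [hA, hB]
  constructor
  · rintro ⟨j, h1, h2, h3⟩; exact ⟨j, Nat.zero_le j, h1, h2, h3⟩
  · rintro ⟨j, _, h1, h2, h3⟩; exact ⟨j, h1, h2, h3⟩
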